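-- pv_equiv track=rewrite | github.com/piodossantos/Artificial-Intelligence-exercises | UT3 - Busqueda local y metaheuristicas/metaheuristics-master/metaheuristics/test_problems.py | alfiles
-- ===== SOURCE A (Python) =====
-- def alfiles(elem):
--     board = [
--     1,2,3,2,6,8,7,2,
--     8,6,2,5,1,3,1,4,
--     7,1,5,4,2,5,6,8,
--     2,8,4,7,5,1,4,3,
--     4,3,7,2,3,8,5,1,
--     6,5,6,3,4,7,8,3,
--     3,7,1,8,6,2,4,6,
--     8,4,5,6,7,5,1,7
--     ]
--     elemsList = list(elem)
--     if len(elemsList)!=len(list(set(elemsList))):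
--         return -65
--     c=1
--     elems=[divmod(x,8) for x in elem]
--     diagons=[]
--     for (a,b) in elems:
--         if c>0:
--             diagons =  [(a+i,b+i) for i in range(1,8) if (a+i)<=7 and (b+i)<=7]
--             diagons += [(a-i,b-i) for i in range(1,8) if (a-i)>=0 and (b-i)>=0]
--             diagons += [(a-i,b+i) for i in range(1,8) if (a-i)>=0 and (b+i)<=7]
--             diagons += [(a+i,b-i) for i in range(1,8) if (a+i)<=7 and (b-i)>=0]
--         for d in diagons:
--             if d in elems:
--                 c=-1
--                 break
--         diagons=[]
--     return (c)*sum([board[x] for x in elem])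
-- ===== SOURCE B (Python) =====
-- def alfiles(elem):
--     board = [
--     1,2,3,2,6,8,7,2,
--     8,6,2,5,1,3,1,4,
--     7,1,5,4,2,5,6,8,
--     2,8,4,7,5,1,4,3,
--     4,3,7,2,3,8,5,1,
--     6,5,6,3,4,7,8,3,
--     3,7,1,8,6,2,4,6,
--     8,4,5,6,7,5,1,7
--     ]
--     elems = list(elem)
--     if len(elems) != len(set(elems)):
--         return -65
--     sums = set()
--     diffs = set()
--     clash = False
--     total = 0
--     for x in elems:
--         a, b = divmod(x, 8)
--         if a + b in sums or a - b in diffs: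
--             clash = True
--         sums.add(a + b)
--         diffs.add(a - b)
--         total += board[x]
--     return -total if clash else total
-- ===== Notes on version B (the rewrite author's own statement) =====
-- stated objective: alternative
-- what changed: Instead of generating up to 28 diagonal squares per bishop and scanning the whole position list for each, B makes one pass keeping two sets of the diagonal keys a+b and a-b and a running board-value total, flagging a clash when a key repeats.
import Mathlib
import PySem

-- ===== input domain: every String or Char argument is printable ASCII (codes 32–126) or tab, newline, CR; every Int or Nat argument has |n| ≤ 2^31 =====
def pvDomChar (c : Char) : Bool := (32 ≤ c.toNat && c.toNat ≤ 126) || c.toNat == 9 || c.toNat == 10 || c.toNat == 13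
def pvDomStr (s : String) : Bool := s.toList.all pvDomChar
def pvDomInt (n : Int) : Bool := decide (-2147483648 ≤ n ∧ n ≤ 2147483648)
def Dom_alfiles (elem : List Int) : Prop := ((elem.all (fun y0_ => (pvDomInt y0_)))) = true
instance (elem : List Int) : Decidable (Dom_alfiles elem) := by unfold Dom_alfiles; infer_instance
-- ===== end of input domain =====

-- B replaces A's per-bishop generation of up to 28 diagonal squares, each scanned against the whole
-- list, by a single pass that collects the diagonal keys a+b and a-b in two sets; return value only.

-- ===== PORT A =====
def pvBoard : List Int := [
  1,2,3,2,6,8,7,2,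
  8,6,2,5,1,3,1,4,
  7,1,5,4,2,5,6,8,
  2,8,4,7,5,1,4,3,
  4,3,7,2,3,8,5,1,
  6,5,6,3,4,7,8,3,
  3,7,1,8,6,2,4,6,
  8,4,5,6,7,5,1,7]

-- the four diagonal list comprehensions of A, verbatim
def pvDiagons (a b : Int) : List (Int × Int) :=
  (((PySem.List.pyRange 1 8 1).filter (fun i => decide (a+i ≤ 7) && decide (b+i ≤ 7))).map (fun i => (a+i, b+i)))
  ++ (((PySem.List.pyRange 1 8 1).filter (fun i => decide (0 ≤ a-i) && decide (0 ≤ b-i))).map (fun i => (a-i, b-i)))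
  ++ (((PySem.List.pyRange 1 8 1).filter (fun i => decide (0 ≤ a-i) && decide (b+i ≤ 7))).map (fun i => (a-i, b+i)))
  ++ (((PySem.List.pyRange 1 8 1).filter (fun i => decide (a+i ≤ 7) && decide (0 ≤ b-i))).map (fun i => (a+i, b-i)))

-- one iteration of A's "for (a,b) in elems" loop: recompute diagons when c>0, scan it against elems
def pvAStep (elems : List (Int × Int)) (c : Int) (p : Int × Int) : Int :=
  let diagons := if 0 < c then pvDiagons p.1 p.2 else []
  if diagons.any (fun d => elems.contains d) then -1 else c

def alfiles (elem : List Int) : Int :=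
  if elem.length ≠ (PySem.Set.ofList elem).length then -65
  else
    let elems := elem.map (fun x => (PySem.Int.floordiv x 8, PySem.Int.mod x 8))
    let c := elems.foldl (pvAStep elems) 1
    -- board[x]: pyGet? with .getD 0 — exact under Pre_ (there every x is in range -64 ≤ x < 64)
    c * (elem.map (fun x => (PySem.List.pyGet? pvBoard x).getD 0)).sum

-- ===== PORT B =====
-- one iteration of B's single pass: state = (sums, diffs, clash, total)
def pvBStep (st : PySem.Set Int × PySem.Set Int × Bool × Int) (x : Int) :
    PySem.Set Int × PySem.Set Int × Bool × Int :=
  let a := PySem.Int.floordiv x 8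
  let b := PySem.Int.mod x 8
  let clash := if st.1.contains (a+b) || st.2.1.contains (a-b) then true else st.2.2.1
  (PySem.Set.add st.1 (a+b), PySem.Set.add st.2.1 (a-b), clash,
   st.2.2.2 + (PySem.List.pyGet? pvBoard x).getD 0)

def alfiles_alt (elem : List Int) : Int :=
  if elem.length ≠ (PySem.Set.ofList elem).length then -65
  else
    let st := elem.foldl pvBStep (PySem.Set.empty, PySem.Set.empty, false, 0)
    if st.2.2.1 then -st.2.2.2 else st.2.2.2

-- ===== PRECONDITION & SPEC =====
-- Pre_ admits exactly the inputs on which A returns: duplicate lists (A returns -65 before any board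
-- lookup) and duplicate-free lists of valid signed board indices -64 ≤ x < 64; on everything else A
-- raises IndexError at board[x].
def Pre_alfiles (elem : List Int) : Prop :=
  ¬ elem.Nodup ∨ ∀ x ∈ elem, -64 ≤ x ∧ x < 64
instance (elem : List Int) : Decidable (Pre_alfiles elem) := by unfold Pre_alfiles; infer_instance
def pvWitness_alfiles : List Int := [0, 9, 63]

def Spec_alfiles (elem : List Int) (out : Int) : Prop := out = alfiles_alt elem
instance (elem : List Int) (out : Int) : Decidable (Spec_alfiles elem out) := by unfold Spec_alfiles; infer_instance

-- ===== CLAIM (what is proved, stated in full; the proofs are below) =====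
def Claim_equal_alfiles : Prop := ∀ (elem : List Int), Dom_alfiles elem → Pre_alfiles elem → Spec_alfiles elem (alfiles elem)

-- ===== LEMMAS AND PROOFS =====

-- B's keys: the two diagonal classes a+b and a-b of (a,b) = divmod(x,8)
def pvKey1 (x : Int) : Int := PySem.Int.floordiv x 8 + PySem.Int.mod x 8
def pvKey2 (x : Int) : Int := PySem.Int.floordiv x 8 - PySem.Int.mod x 8
def pvG (x : Int) : Int := (PySem.List.pyGet? pvBoard x).getD 0

-- folding Set.add appends a sublist of the fed list
theorem pv_foldl_add_sublist {α : Type} [BEq α] (l : List α) (s : PySem.Set α) :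
    ∃ t, l.foldl PySem.Set.add s = s ++ t ∧ List.Sublist t l := by
  induction l generalizing s with
  | nil => exact ⟨[], by simp⟩
  | cons x xs ih =>
    simp only [List.foldl_cons]
    obtain ⟨t, ht, hs⟩ := ih (PySem.Set.add s x)
    by_cases hx : List.contains s x = true
    · refine ⟨t, ?_, hs.cons x⟩
      rw [show PySem.Set.add s x = s by simp [PySem.Set.add, hx]] at ht ⊢; exact ht
    · refine ⟨x :: t, ?_, hs.cons₂ x⟩
      rw [show PySem.Set.add s x = s ++ [x] by simp [PySem.Set.add, hx]] at ht ⊢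
      simpa using ht

-- A's (and B's) duplicate test len(list) == len(set) is exactly Nodup
theorem pv_len_ofList_iff (l : List Int) :
    l.length = (PySem.Set.ofList l).length ↔ l.Nodup := by
  constructor
  · intro h
    obtain ⟨t, ht, hs⟩ := pv_foldl_add_sublist l ([] : PySem.Set Int)
    rw [← PySem.Set.ofList_eq_foldl] at ht
    have h1 : PySem.Set.ofList l = t := by simpa using ht
    have h2 : t = l := hs.eq_of_length (by rw [← h1]; omega)
    have := PySem.Set.nodup_ofList l
    rwa [h1, h2] at this
  · intro h
    rw [PySem.Set.ofList_eq_self_of_nodup l h]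

-- membership in A's diagons list, characterised
theorem pv_mem_diagons (a b a' b' : Int) :
    ((a', b') ∈ pvDiagons a b) ↔ ∃ i, 1 ≤ i ∧ i < 8 ∧
      ((a+i ≤ 7 ∧ b+i ≤ 7 ∧ a' = a+i ∧ b' = b+i) ∨
       (0 ≤ a-i ∧ 0 ≤ b-i ∧ a' = a-i ∧ b' = b-i) ∨
       (0 ≤ a-i ∧ b+i ≤ 7 ∧ a' = a-i ∧ b' = b+i) ∨
       (a+i ≤ 7 ∧ 0 ≤ b-i ∧ a' = a+i ∧ b' = b-i)) := by
  simp only [pvDiagons, List.mem_append, List.mem_map, List.mem_filter,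
    PySem.List.mem_pyRange_one, Bool.and_eq_true, decide_eq_true_eq, Prod.mk.injEq]
  constructor
  · rintro (((⟨i,⟨⟨h1,h2⟩,h3,h4⟩,h5,h6⟩|⟨i,⟨⟨h1,h2⟩,h3,h4⟩,h5,h6⟩)|⟨i,⟨⟨h1,h2⟩,h3,h4⟩,h5,h6⟩)|⟨i,⟨⟨h1,h2⟩,h3,h4⟩,h5,h6⟩) <;>
      exact ⟨i, h1, h2, by omega⟩
  · rintro ⟨i, h1, h2, (⟨h3,h4,h5,h6⟩|⟨h3,h4,h5,h6⟩|⟨h3,h4,h5,h6⟩|⟨h3,h4,h5,h6⟩)⟩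
    · exact Or.inl (Or.inl (Or.inl ⟨i, ⟨⟨h1,h2⟩,h3,h4⟩, h5.symm, h6.symm⟩))
    · exact Or.inl (Or.inl (Or.inr ⟨i, ⟨⟨h1,h2⟩,h3,h4⟩, h5.symm, h6.symm⟩))
    · exact Or.inl (Or.inr ⟨i, ⟨⟨h1,h2⟩,h3,h4⟩, h5.symm, h6.symm⟩)
    · exact Or.inr ⟨i, ⟨⟨h1,h2⟩,h3,h4⟩, h5.symm, h6.symm⟩

-- soundness: a hit in diagons means a shared diagonal key, and a different square
theorem pv_diagons_sound (a b a' b' : Int) (h : (a', b') ∈ pvDiagons a b) :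
    (a + b = a' + b' ∨ a - b = a' - b') ∧ ¬(a = a' ∧ b = b') := by
  rw [pv_mem_diagons] at h
  obtain ⟨i, h1, h2, h3⟩ := h
  constructor
  · rcases h3 with ⟨_,_,h5,h6⟩|⟨_,_,h5,h6⟩|⟨_,_,h5,h6⟩|⟨_,_,h5,h6⟩ <;> omega
  · rcases h3 with ⟨_,_,h5,h6⟩|⟨_,_,h5,h6⟩|⟨_,_,h5,h6⟩|⟨_,_,h5,h6⟩ <;> omega

-- completeness (symmetric): on the reachable coordinate ranges every shared key is detected
theorem pv_diagons_complete (a b a' b' : Int)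
    (ha : -8 ≤ a ∧ a ≤ 7) (hb : 0 ≤ b ∧ b ≤ 7) (ha' : -8 ≤ a' ∧ a' ≤ 7) (hb' : 0 ≤ b' ∧ b' ≤ 7)
    (hk : a + b = a' + b' ∨ a - b = a' - b') (hne : ¬(a = a' ∧ b = b')) :
    (a', b') ∈ pvDiagons a b ∨ (a, b) ∈ pvDiagons a' b' := by
  rcases hk with hk | hk
  · by_cases hlt : a' < a
    · by_cases h0 : 0 ≤ a'
      · exact Or.inl (by rw [pv_mem_diagons]; exact ⟨a - a', by omega⟩)
      · exact Or.inr (by rw [pv_mem_diagons]; exact ⟨a - a', by omega⟩)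
    · by_cases h0 : 0 ≤ a
      · exact Or.inr (by rw [pv_mem_diagons]; exact ⟨a' - a, by omega⟩)
      · exact Or.inl (by rw [pv_mem_diagons]; exact ⟨a' - a, by omega⟩)
  · by_cases hlt : a < a'
    · exact Or.inl (by rw [pv_mem_diagons]; exact ⟨a' - a, by omega⟩)
    · exact Or.inr (by rw [pv_mem_diagons]; exact ⟨a - a', by omega⟩)

-- A's loop: once c = -1 it stays -1 (diagons is left empty)
theorem pv_aloop_neg (E l : List (Int × Int)) : l.foldl (pvAStep E) (-1) = -1 := by
  induction l with
  | nil => rfl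
  | cons p l ih => simpa [pvAStep] using ih

-- A's loop computes "some bishop sees another along its diagons"
theorem pv_aloop (E l : List (Int × Int)) :
    l.foldl (pvAStep E) 1 =
      if l.any (fun p => (pvDiagons p.1 p.2).any (fun d => E.contains d)) then -1 else 1 := by
  induction l with
  | nil => rfl
  | cons p l ih =>
    simp only [List.foldl_cons, List.any_cons]
    have hstep : pvAStep E 1 p =
        if ((pvDiagons p.1 p.2).any fun d => E.contains d) = true then -1 else 1 := rfl
    by_cases hp : ((pvDiagons p.1 p.2).any (fun d => E.contains d)) = true
    · rw [show pvAStep E 1 p = -1 by rw [hstep]; simp only [hp]; rfl]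
      simp only [hp, Bool.true_or]
      simp [pv_aloop_neg]
    · have hp' : ((pvDiagons p.1 p.2).any (fun d => E.contains d)) = false := by
        simpa using hp
      rw [show pvAStep E 1 p = 1 by rw [hstep]; simp only [hp']; rfl]
      simp only [hp', Bool.false_or]
      exact ih

-- B's clash flag restricted to one key
def pvClash1 (k : Int → Int) : List Int → PySem.Set Int → Bool
  | [], _ => false
  | x :: xs, S => PySem.Set.contains S (k x) || pvClash1 k xs (PySem.Set.add S (k x))

-- B's fold, decomposed into its four components
theorem pv_bloop (l : List Int) (S D : PySem.Set Int) (cl : Bool) (t : Int) :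
    l.foldl pvBStep (S, D, cl, t) =
      (l.foldl (fun s x => PySem.Set.add s (pvKey1 x)) S,
       l.foldl (fun s x => PySem.Set.add s (pvKey2 x)) D,
       cl || (pvClash1 pvKey1 l S || pvClash1 pvKey2 l D),
       t + (l.map pvG).sum) := by
  induction l generalizing S D cl t with
  | nil => simp [pvClash1]
  | cons x xs ih =>
    simp only [List.foldl_cons, pvBStep, List.map_cons, List.sum_cons]
    rw [ih]
    simp only [Prod.mk.injEq, true_and, pvClash1, pvKey1, pvKey2, pvG]
    refine ⟨?_, by ring⟩
    cases cl <;>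
      cases hc1 : PySem.Set.contains S (PySem.Int.floordiv x 8 + PySem.Int.mod x 8) <;>
      cases hc2 : PySem.Set.contains D (PySem.Int.floordiv x 8 - PySem.Int.mod x 8) <;>
      simp [Bool.or_comm]

-- the one-key clash flag says: some key is seeded or repeats
theorem pv_clash1_iff (k : Int → Int) (l : List Int) (S : PySem.Set Int) :
    pvClash1 k l S = true ↔ (∃ x ∈ l, k x ∈ S) ∨ ¬ (l.map k).Nodup := by
  induction l generalizing S with
  | nil => simp [pvClash1]
  | cons x xs ih =>
    simp only [pvClash1, Bool.or_eq_true, PySem.Set.contains_iff, ih, List.map_cons,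
      List.nodup_cons, List.mem_cons, List.mem_map, PySem.Set.mem_add]
    constructor
    · rintro (h | ⟨y, hy, hS | hEq⟩ | hnd)
      · exact Or.inl ⟨x, Or.inl rfl, h⟩
      · exact Or.inl ⟨y, Or.inr hy, hS⟩
      · exact Or.inr (fun ⟨hmem, _⟩ => hmem ⟨y, hy, hEq⟩)
      · exact Or.inr (fun ⟨_, hn⟩ => hnd hn)
    · rintro (⟨y, rfl | hy, hS⟩ | hnd)
      · exact Or.inl hS
      · exact Or.inr (Or.inl ⟨y, hy, Or.inl hS⟩)
      · by_cases hx : ∃ y ∈ xs, k y = k x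
        · obtain ⟨y, hy, hEq⟩ := hx
          exact Or.inr (Or.inl ⟨y, hy, Or.inr hEq⟩)
        · refine Or.inr (Or.inr fun hn => hnd ⟨fun ⟨y, hy, hEq⟩ => hx ⟨y, hy, hEq⟩, hn⟩)

-- a nodup list whose image repeats contains two distinct elements with equal image, and back
theorem pv_map_nodup (l : List Int) (g : Int → Int) (h : l.Nodup) :
    ¬ (l.map g).Nodup ↔ ∃ p ∈ l, ∃ q ∈ l, p ≠ q ∧ g p = g q := by
  induction l with
  | nil => simp
  | cons x xs ih =>
    simp only [List.nodup_cons] at h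
    obtain ⟨hx, hxs⟩ := h
    simp only [List.map_cons, List.nodup_cons, List.mem_map, List.mem_cons, not_and_or, ih hxs]
    constructor
    · rintro (h | h)
      · push_neg at h
        obtain ⟨y, hy, hEq⟩ := h
        exact ⟨x, Or.inl rfl, y, Or.inr hy, fun he => hx (he ▸ hy), hEq.symm⟩
      · obtain ⟨p, hp, q, hq, hne, hEq⟩ := h
        exact ⟨p, Or.inr hp, q, Or.inr hq, hne, hEq⟩
    · rintro ⟨p, rfl | hp, q, rfl | hq, hne, hEq⟩
      · exact absurd rfl hne
      · exact Or.inl (by push_neg; exact ⟨q, hq, hEq.symm⟩)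
      · exact Or.inl (by push_neg; exact ⟨p, hp, hEq⟩)
      · exact Or.inr ⟨p, hp, q, hq, hne, hEq⟩

-- bounds of divmod(x,8) on the admitted range
theorem pv_divmod_bounds (x : Int) (h : -64 ≤ x ∧ x < 64) :
    (-8 ≤ PySem.Int.floordiv x 8 ∧ PySem.Int.floordiv x 8 ≤ 7) ∧
    (0 ≤ PySem.Int.mod x 8 ∧ PySem.Int.mod x 8 ≤ 7) := by
  have h1 := PySem.Int.floordiv_mul_add_mod x 8
  have h2 := PySem.Int.mod_nonneg x (b := 8) (by norm_num)
  have h3 := PySem.Int.mod_lt x (b := 8) (by norm_num)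
  omega

-- divmod(·,8) is injective
theorem pv_divmod_inj (x y : Int)
    (h1 : PySem.Int.floordiv x 8 = PySem.Int.floordiv y 8)
    (h2 : PySem.Int.mod x 8 = PySem.Int.mod y 8) : x = y := by
  have hx := PySem.Int.floordiv_mul_add_mod x 8
  have hy := PySem.Int.floordiv_mul_add_mod y 8
  omega

-- the two conflict tests agree on duplicate-free in-range input
theorem pv_conflict_iff (elem : List Int) (hnd : elem.Nodup) (hr : ∀ x ∈ elem, -64 ≤ x ∧ x < 64) :
    ((elem.map (fun x => (PySem.Int.floordiv x 8, PySem.Int.mod x 8))).any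
        (fun p => (pvDiagons p.1 p.2).any
          (fun d => (elem.map (fun x => (PySem.Int.floordiv x 8, PySem.Int.mod x 8))).contains d)) = true)
      ↔ (¬ (elem.map pvKey1).Nodup ∨ ¬ (elem.map pvKey2).Nodup) := by
  rw [pv_map_nodup elem pvKey1 hnd, pv_map_nodup elem pvKey2 hnd]
  simp only [List.any_eq_true, List.contains_iff_mem, List.mem_map]
  constructor
  · rintro ⟨p, ⟨x, hxm, rfl⟩, d, hd, ⟨y, hym, rfl⟩⟩
    obtain ⟨hk, hne⟩ := pv_diagons_sound _ _ _ _ hd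
    have hxy : x ≠ y := by
      intro h; subst h; exact hne ⟨rfl, rfl⟩
    rcases hk with hk | hk
    · exact Or.inl ⟨x, hxm, y, hym, hxy, by simpa [pvKey1] using hk⟩
    · exact Or.inr ⟨x, hxm, y, hym, hxy, by simpa [pvKey2] using hk⟩
  · intro h
    have key : ∃ x ∈ elem, ∃ y ∈ elem, x ≠ y ∧
        (PySem.Int.floordiv x 8 + PySem.Int.mod x 8 = PySem.Int.floordiv y 8 + PySem.Int.mod y 8 ∨
         PySem.Int.floordiv x 8 - PySem.Int.mod x 8 = PySem.Int.floordiv y 8 - PySem.Int.mod y 8) := by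
      rcases h with ⟨x, hxm, y, hym, hxy, hk⟩ | ⟨x, hxm, y, hym, hxy, hk⟩
      · exact ⟨x, hxm, y, hym, hxy, Or.inl (by simpa [pvKey1] using hk)⟩
      · exact ⟨x, hxm, y, hym, hxy, Or.inr (by simpa [pvKey2] using hk)⟩
    obtain ⟨x, hxm, y, hym, hxy, hk⟩ := key
    have hbx := pv_divmod_bounds x (hr x hxm)
    have hby := pv_divmod_bounds y (hr y hym)
    have hne : ¬(PySem.Int.floordiv x 8 = PySem.Int.floordiv y 8 ∧
        PySem.Int.mod x 8 = PySem.Int.mod y 8) := by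
      rintro ⟨h1, h2⟩; exact hxy (pv_divmod_inj x y h1 h2)
    rcases pv_diagons_complete _ _ _ _ hbx.1 ⟨hbx.2.1, hbx.2.2⟩ hby.1 ⟨hby.2.1, hby.2.2⟩ hk hne with hm | hm
    · exact ⟨_, ⟨x, hxm, rfl⟩, _, hm, ⟨y, hym, rfl⟩⟩
    · exact ⟨_, ⟨y, hym, rfl⟩, _, hm, ⟨x, hxm, rfl⟩⟩

-- ===== VERDICT (by name: the statement is the Claim_ definition above) =====
theorem alfiles_spec : Claim_equal_alfiles := by
  intro elem _hdom hpre
  unfold Spec_alfiles alfiles alfiles_alt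
  by_cases hg : elem.length ≠ (PySem.Set.ofList elem).length
  · rw [if_pos hg, if_pos hg]
  · rw [if_neg hg, if_neg hg]
    dsimp only
    have hnd : elem.Nodup := (pv_len_ofList_iff elem).mp (not_not.mp hg)
    have hr : ∀ x ∈ elem, -64 ≤ x ∧ x < 64 := by
      rcases hpre with hpre | hpre
      · exact absurd hnd hpre
      · exact hpre
    rw [pv_aloop, pv_bloop]
    have hCB : (pvClash1 pvKey1 elem PySem.Set.empty || pvClash1 pvKey2 elem PySem.Set.empty) = true
        ↔ (¬ (elem.map pvKey1).Nodup ∨ ¬ (elem.map pvKey2).Nodup) := by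
      rw [Bool.or_eq_true, pv_clash1_iff, pv_clash1_iff]
      simp [PySem.Set.empty]
    have hsame := (pv_conflict_iff elem hnd hr).trans hCB.symm
    have hsum : List.map pvG elem = List.map (fun x => (PySem.List.pyGet? pvBoard x).getD 0) elem := rfl
    by_cases hC : ((elem.map (fun x => (PySem.Int.floordiv x 8, PySem.Int.mod x 8))).any
        (fun p => (pvDiagons p.1 p.2).any
          (fun d => (elem.map (fun x => (PySem.Int.floordiv x 8, PySem.Int.mod x 8))).contains d)) = true)
    · rw [if_pos hC, hsame.mp hC]
      simp only [Bool.or_true, if_true, hsum]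
      ring
    · have hB' : (pvClash1 pvKey1 elem PySem.Set.empty || pvClash1 pvKey2 elem PySem.Set.empty) = false := by
        cases hb : (pvClash1 pvKey1 elem PySem.Set.empty || pvClash1 pvKey2 elem PySem.Set.empty) with
        | false => rfl
        | true => exact absurd (hsame.mpr hb) hC
      rw [if_neg hC, hB']
      simp [hsum]
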